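-- pv_equiv track=rewrite | github.com/andrew-j-leon/led-strip-audio-visualizer | python/controller/audio_in_controller.py | _create_mirrored_groups
-- ===== SOURCE A (Python) =====
-- from typing import Callable, List, Set, Tuple, Union
--
-- def _create_mirrored_groups(start_led: int, end_led: int, number_of_groups: int) -> List[Set[Tuple[int, int]]]:
--     if (start_led < 0):
--         raise ValueError(f'start_led must be >= 0, but was {start_led}.')
--
--     if (end_led < 0):
--         raise ValueError(f'end_led must be >= 0, but was {end_led}.')
--
--     if (number_of_groups < 0):
--         raise ValueError(f'number_of_groups ({number_of_groups}) must be >= 0.')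
--
--     NUMBER_OF_LEDS = end_led - start_led
--
--     if (NUMBER_OF_LEDS < 0):
--         raise ValueError(f'start_led ({start_led}) must be <= end_led ({end_led}).')
--
--     if (NUMBER_OF_LEDS == 0 or number_of_groups == 0):
--         return []
--
--     NUMBER_OF_LEDS_PER_GROUP = max(1, NUMBER_OF_LEDS // number_of_groups)
--     NUMBER_OF_LEDS_PER_LED_RANGE = max(1, NUMBER_OF_LEDS_PER_GROUP // 2)
--
--     group_led_ranges: List[Set[Tuple[int, int]]] = [set() for group_number in range(number_of_groups)]
--
--     led_range_start = start_led
--     led_range_end = led_range_start + NUMBER_OF_LEDS_PER_LED_RANGE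
--
--     group_number = number_of_groups - 1
--
--     while (group_number >= 0 and led_range_end <= end_led):
--         group_led_ranges[group_number].add((led_range_start, led_range_end))
--
--         led_range_start += NUMBER_OF_LEDS_PER_LED_RANGE
--         led_range_end += NUMBER_OF_LEDS_PER_LED_RANGE
--         group_number -= 1
--
--     NUMBER_OF_LED_RANGES = NUMBER_OF_LEDS // NUMBER_OF_LEDS_PER_LED_RANGE
--     group_number = 0 if (NUMBER_OF_LED_RANGES % 2 == 0) else 1
--
--     while (group_number < number_of_groups and led_range_end <= end_led):
--         group_led_ranges[group_number].add((led_range_start, led_range_end))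
--
--         led_range_start += NUMBER_OF_LEDS_PER_LED_RANGE
--         led_range_end += NUMBER_OF_LEDS_PER_LED_RANGE
--         group_number += 1
--
--     return group_led_ranges
-- ===== SOURCE B (Python) =====
-- from typing import List, Set, Tuple
--
-- def _create_mirrored_groups(start_led: int, end_led: int, number_of_groups: int) -> List[Set[Tuple[int, int]]]:
--     if (start_led < 0):
--         raise ValueError(f'start_led must be >= 0, but was {start_led}.')
--
--     if (end_led < 0):
--         raise ValueError(f'end_led must be >= 0, but was {end_led}.')
--
--     if (number_of_groups < 0):
--         raise ValueError(f'number_of_groups ({number_of_groups}) must be >= 0.')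
--
--     NUMBER_OF_LEDS = end_led - start_led
--
--     if (NUMBER_OF_LEDS < 0):
--         raise ValueError(f'start_led ({start_led}) must be <= end_led ({end_led}).')
--
--     if (NUMBER_OF_LEDS == 0 or number_of_groups == 0):
--         return []
--
--     n = number_of_groups
--     step = max(1, max(1, NUMBER_OF_LEDS // n) // 2)
--
--     # Ranges are indexed k = 0, 1, 2, ...; range k is
--     # (start_led + k*step, start_led + (k+1)*step), and exactly the first
--     # R = NUMBER_OF_LEDS // step of them fit inside [start_led, end_led].
--     R = NUMBER_OF_LEDS // step
--     t1 = min(n, R)          # ranges 0..t1-1 go to groups n-1, n-2, ...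
--     p = R % 2               # ascending run restarts at group p
--     t2 = max(0, min(n - p, R - t1))   # ranges t1..t1+t2-1 go to groups p, p+1, ...
--
--     def rng(k: int) -> Tuple[int, int]:
--         return (start_led + k * step, start_led + (k + 1) * step)
--
--     # Group-major: compute each group's ranges directly by closed-form index
--     # arithmetic instead of walking a cursor over the strip.
--     groups: List[Set[Tuple[int, int]]] = []
--     for g in range(n):
--         s: Set[Tuple[int, int]] = set()
--         if g >= n - t1:
--             s.add(rng(n - 1 - g))
--         if p <= g < p + t2:
--             s.add(rng(t1 + g - p))
--         groups.append(s)
--     return groups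
-- ===== Notes on version B (the rewrite author's own statement) =====
-- stated objective: alternative
-- what changed: A walks a cursor over the LED strip range-major with two while loops scattering ranges into groups; B is group-major: it derives closed-form index arithmetic (R = fitting ranges, t1/t2 run lengths, parity offset p) and computes each group's set of ranges directly with no cursor simulation.
import Mathlib
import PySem

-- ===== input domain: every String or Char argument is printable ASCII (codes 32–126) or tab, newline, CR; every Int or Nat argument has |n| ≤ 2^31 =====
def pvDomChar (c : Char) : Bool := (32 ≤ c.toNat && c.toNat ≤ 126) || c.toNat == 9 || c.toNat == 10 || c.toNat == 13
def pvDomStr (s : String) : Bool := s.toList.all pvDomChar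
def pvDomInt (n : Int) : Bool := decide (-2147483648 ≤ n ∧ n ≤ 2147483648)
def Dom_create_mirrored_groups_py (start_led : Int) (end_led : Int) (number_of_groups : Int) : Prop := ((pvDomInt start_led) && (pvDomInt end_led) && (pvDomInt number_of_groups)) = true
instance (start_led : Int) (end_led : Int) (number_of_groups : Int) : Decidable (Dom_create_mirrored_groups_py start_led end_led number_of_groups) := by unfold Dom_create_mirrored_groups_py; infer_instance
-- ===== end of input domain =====

-- A walks a cursor over the strip range-major (two while loops scattering ranges into
-- groups); B is group-major: closed-form index arithmetic gives each group its set of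
-- ranges directly, with no cursor simulation (objective: alternative algorithm).
-- Return-value equivalence only (neither mutates an argument).

-- ===== PORT A =====
-- first while loop: group_number counts down from number_of_groups-1
def pvA_loop1 (end_led step : Int) (acc : List (List (Int × Int))) (s e g : Int) :
    List (List (Int × Int)) × Int × Int :=
  if h : 0 ≤ g ∧ e ≤ end_led then
    pvA_loop1 end_led step (acc.modify g.toNat (fun st => PySem.Set.add st (s, e)))
      (s + step) (e + step) (g - 1)
  else (acc, s, e)
termination_by (g + 1).toNat
decreasing_by omega

-- second while loop: group_number counts up to number_of_groups
def pvA_loop2 (end_led step n : Int) (acc : List (List (Int × Int))) (s e g : Int) :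
    List (List (Int × Int)) :=
  if h : g < n ∧ e ≤ end_led then
    pvA_loop2 end_led step n (acc.modify g.toNat (fun st => PySem.Set.add st (s, e)))
      (s + step) (e + step) (g + 1)
  else acc
termination_by (n - g).toNat
decreasing_by omega

-- on inputs where the Python raises ValueError (excluded by Pre_) the port returns []
def create_mirrored_groups_py (start_led : Int) (end_led : Int) (number_of_groups : Int) : List (List (Int × Int)) :=
  if start_led < 0 then [] else
  if end_led < 0 then [] else
  if number_of_groups < 0 then [] else
  let NUMBER_OF_LEDS := end_led - start_led
  if NUMBER_OF_LEDS < 0 then [] else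
  if NUMBER_OF_LEDS = 0 ∨ number_of_groups = 0 then [] else
  let NUMBER_OF_LEDS_PER_GROUP := max 1 (PySem.Int.floordiv NUMBER_OF_LEDS number_of_groups)
  let NUMBER_OF_LEDS_PER_LED_RANGE := max 1 (PySem.Int.floordiv NUMBER_OF_LEDS_PER_GROUP 2)
  let group_led_ranges : List (List (Int × Int)) := List.replicate number_of_groups.toNat []
  let led_range_start := start_led
  let led_range_end := led_range_start + NUMBER_OF_LEDS_PER_LED_RANGE
  let r1 := pvA_loop1 end_led NUMBER_OF_LEDS_PER_LED_RANGE group_led_ranges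
              led_range_start led_range_end (number_of_groups - 1)
  let NUMBER_OF_LED_RANGES := PySem.Int.floordiv NUMBER_OF_LEDS NUMBER_OF_LEDS_PER_LED_RANGE
  let group_number : Int := if PySem.Int.mod NUMBER_OF_LED_RANGES 2 = 0 then 0 else 1
  pvA_loop2 end_led NUMBER_OF_LEDS_PER_LED_RANGE number_of_groups r1.1 r1.2.1 r1.2.2 group_number

-- ===== PORT B =====
-- one group's set: at most one range from the descending run (index n-1-g, present when
-- g >= n - t1) and at most one from the ascending run (index t1 + g - p, present when
-- p <= g < p + t2); range k is (start + k*step, start + (k+1)*step)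
def pvB_group (start_led step t1 p t2 n g : Int) : List (Int × Int) :=
  let s0 : List (Int × Int) := []
  let s1 := if n - t1 ≤ g then
      PySem.Set.add s0 (start_led + (n - 1 - g) * step, start_led + (n - 1 - g + 1) * step)
    else s0
  if p ≤ g ∧ g < p + t2 then
    PySem.Set.add s1 (start_led + (t1 + g - p) * step, start_led + (t1 + g - p + 1) * step)
  else s1

def create_mirrored_groups_py_alt (start_led : Int) (end_led : Int) (number_of_groups : Int) : List (List (Int × Int)) :=
  if start_led < 0 then [] else
  if end_led < 0 then [] else
  if number_of_groups < 0 then [] else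
  let NUMBER_OF_LEDS := end_led - start_led
  if NUMBER_OF_LEDS < 0 then [] else
  if NUMBER_OF_LEDS = 0 ∨ number_of_groups = 0 then [] else
  let n := number_of_groups
  let step := max 1 (PySem.Int.floordiv (max 1 (PySem.Int.floordiv NUMBER_OF_LEDS n)) 2)
  let R := PySem.Int.floordiv NUMBER_OF_LEDS step
  let t1 := min n R
  let p := PySem.Int.mod R 2
  let t2 := max 0 (min (n - p) (R - t1))
  (PySem.List.pyRange 0 n 1).map (fun g => pvB_group start_led step t1 p t2 n g)

-- ===== PRECONDITION & SPEC =====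
-- Pre_ excludes exactly the inputs where A raises ValueError: a negative argument
-- or start_led > end_led.
def Pre_create_mirrored_groups_py (start_led : Int) (end_led : Int) (number_of_groups : Int) : Prop :=
  0 ≤ start_led ∧ 0 ≤ end_led ∧ 0 ≤ number_of_groups ∧ start_led ≤ end_led
instance (start_led : Int) (end_led : Int) (number_of_groups : Int) : Decidable (Pre_create_mirrored_groups_py start_led end_led number_of_groups) := by unfold Pre_create_mirrored_groups_py; infer_instance

def pvWitness_create_mirrored_groups_py : Int × Int × Int := (0, 10, 3)

def Spec_create_mirrored_groups_py (start_led : Int) (end_led : Int) (number_of_groups : Int) (out : List (List (Int × Int))) : Prop := out = create_mirrored_groups_py_alt start_led end_led number_of_groups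
instance (start_led : Int) (end_led : Int) (number_of_groups : Int) (out : List (List (Int × Int))) : Decidable (Spec_create_mirrored_groups_py start_led end_led number_of_groups out) := by unfold Spec_create_mirrored_groups_py; infer_instance

-- ===== CLAIM (what is proved, stated in full; the proofs are below) =====
def Claim_equal_create_mirrored_groups_py : Prop := ∀ (start_led : Int) (end_led : Int) (number_of_groups : Int), Dom_create_mirrored_groups_py start_led end_led number_of_groups → Pre_create_mirrored_groups_py start_led end_led number_of_groups → Spec_create_mirrored_groups_py start_led end_led number_of_groups (create_mirrored_groups_py start_led end_led number_of_groups)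

-- ===== LEMMAS AND PROOFS =====

-- the (range-target, range) pairs A's cursor walk emits from an index list, plus the
-- final cursor
def pvPairsC (end_led step : Int) (idxs : List Int) (c : Int) :
    List (Int × (Int × Int)) × Int :=
  match idxs with
  | [] => ([], c)
  | g :: rest =>
    if c + step > end_led then ([], c)
    else
      let r := pvPairsC end_led step rest (c + step)
      ((g, (c, c + step)) :: r.1, r.2)

-- scatter the emitted pairs into the group list
def pvScatter (ps : List (Int × (Int × Int))) (acc : List (List (Int × Int))) :
    List (List (Int × Int)) :=
  ps.foldl (fun a gr => a.modify gr.1.toNat (fun st => PySem.Set.add st gr.2)) acc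

theorem pvA_loop1_eq (end_led step : Int) (g : Int) (acc : List (List (Int × Int))) (s : Int) :
    pvA_loop1 end_led step acc s (s + step) g
      = (pvScatter (pvPairsC end_led step (PySem.List.pyRange g (-1) (-1)) s).1 acc,
         (pvPairsC end_led step (PySem.List.pyRange g (-1) (-1)) s).2,
         (pvPairsC end_led step (PySem.List.pyRange g (-1) (-1)) s).2 + step) := by
  by_cases hg : 0 ≤ g
  · rw [PySem.List.pyRange_neg_one_cons (by omega : (-1 : Int) < g)]
    by_cases he : s + step ≤ end_led
    · rw [pvA_loop1]
      simp only [hg, he, and_self]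
      have := pvA_loop1_eq end_led step (g - 1)
        (acc.modify g.toNat (fun st => PySem.Set.add st (s, s + step))) (s + step)
      simp only [pvPairsC, if_neg (by omega : ¬ s + step > end_led)]
      simpa [pvScatter, List.foldl] using this
    · rw [pvA_loop1]
      simp [he, pvPairsC, pvScatter, show s + step > end_led by omega]
  · rw [PySem.List.pyRange_neg_one_eq_nil (by omega : g ≤ -1)]
    rw [pvA_loop1]
    simp [hg, pvPairsC, pvScatter]
termination_by (g + 1).toNat
decreasing_by omega

theorem pvA_loop2_eq (end_led step n : Int) (g : Int) (acc : List (List (Int × Int))) (s : Int) :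
    pvA_loop2 end_led step n acc s (s + step) g
      = pvScatter (pvPairsC end_led step (PySem.List.pyRange g n 1) s).1 acc := by
  by_cases hg : g < n
  · rw [PySem.List.pyRange_one_cons hg]
    by_cases he : s + step ≤ end_led
    · rw [pvA_loop2]
      simp only [hg, he, and_self]
      have := pvA_loop2_eq end_led step n (g + 1)
        (acc.modify g.toNat (fun st => PySem.Set.add st (s, s + step))) (s + step)
      simp only [pvPairsC, if_neg (by omega : ¬ s + step > end_led)]
      simpa [pvScatter, List.foldl] using this
    · rw [pvA_loop2]
      simp [he, pvPairsC, pvScatter, show s + step > end_led by omega]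
  · rw [PySem.List.pyRange_one_eq_nil (by omega : n ≤ g)]
    rw [pvA_loop2]
    simp [hg, pvPairsC, pvScatter]
termination_by (n - g).toNat
decreasing_by omega

theorem pvScatter_length (ps : List (Int × (Int × Int))) (acc : List (List (Int × Int))) :
    (pvScatter ps acc).length = acc.length := by
  induction ps generalizing acc with
  | nil => rfl
  | cons hd tl ih =>
    show (pvScatter tl (acc.modify hd.1.toNat fun st => PySem.Set.add st hd.2)).length = acc.length
    rw [ih, List.length_modify]

theorem pvScatter_getElem (ps : List (Int × (Int × Int))) (acc : List (List (Int × Int)))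
    (j : Nat) (hj : j < acc.length) :
    (pvScatter ps acc)[j]'(by rw [pvScatter_length]; exact hj)
      = ps.foldl (fun st gr => if gr.1.toNat = j then PySem.Set.add st gr.2 else st)
          (acc[j]'hj) := by
  induction ps generalizing acc with
  | nil => rfl
  | cons hd tl ih =>
    show (pvScatter tl (acc.modify hd.1.toNat fun st => PySem.Set.add st hd.2))[j]'_ = _
    refine Eq.trans (ih (acc.modify hd.1.toNat fun st => PySem.Set.add st hd.2)
        (by rw [List.length_modify]; exact hj)) ?_
    simp only [List.foldl]
    congr 1
    rw [List.getElem_modify]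

-- final cursor = start cursor + (#emitted)·step
theorem pvPairsC_snd (end_led step : Int) (idxs : List Int) (c : Int) :
    (pvPairsC end_led step idxs c).2 = c + (pvPairsC end_led step idxs c).1.length * step := by
  induction idxs generalizing c with
  | nil => simp [pvPairsC]
  | cons g rest ih =>
    by_cases h : c + step > end_led
    · simp [pvPairsC, h]
    · simp only [pvPairsC, if_neg h, List.length_cons]
      rw [ih (c + step)]
      push_cast
      ring

-- #emitted, closed form (step > 0)
theorem pvPairsC_length (end_led step : Int) (hstep : 0 < step) (idxs : List Int) (c : Int) :
    ((pvPairsC end_led step idxs c).1.length : Int)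
      = min (idxs.length : Int) (max 0 (PySem.Int.floordiv (end_led - c) step)) := by
  induction idxs generalizing c with
  | nil =>
    have : (0:Int) ≤ max 0 (PySem.Int.floordiv (end_led - c) step) := le_max_left _ _
    simp only [pvPairsC, List.length_nil]
    omega
  | cons g rest ih =>
    by_cases h : c + step > end_led
    · have hlt : PySem.Int.floordiv (end_led - c) step < 1 := by
        rw [PySem.Int.floordiv_lt_iff_lt_mul hstep]; omega
      simp only [pvPairsC, if_pos h, List.length_nil, List.length_cons]
      omega
    · have h1 : (1:Int) ≤ PySem.Int.floordiv (end_led - c) step := by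
        rw [PySem.Int.le_floordiv_iff_mul_le hstep]; omega
      have hshift : PySem.Int.floordiv (end_led - (c + step)) step
          = PySem.Int.floordiv (end_led - c) step - 1 := by
        rw [PySem.Int.floordiv_eq_ediv_of_pos hstep,
            PySem.Int.floordiv_eq_ediv_of_pos hstep]
        have : end_led - (c + step) = (end_led - c) + (-1) * step := by ring
        rw [this, Int.add_mul_ediv_right _ _ (by omega : step ≠ 0)]
        ring
      simp only [pvPairsC, if_neg h, List.length_cons]
      have := ih (c + step)
      rw [hshift] at this
      push_cast at this ⊢
      omega

-- fold over the descending run's pairs, closed form (step > 0)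
theorem pvFold_desc (end_led step : Int) (hstep : 0 < step) (g c : Int)
    (st : List (Int × Int)) (j : Nat) :
    (pvPairsC end_led step (PySem.List.pyRange g (-1) (-1)) c).1.foldl
        (fun st gr => if gr.1.toNat = j then PySem.Set.add st gr.2 else st) st
      = if (j : Int) ≤ g ∧ c + (g - j + 1) * step ≤ end_led then
          PySem.Set.add st (c + (g - j) * step, c + (g - j + 1) * step)
        else st := by
  by_cases hg : 0 ≤ g
  · rw [PySem.List.pyRange_neg_one_cons (by omega : (-1 : Int) < g)]
    by_cases he : c + step > end_led
    · simp only [pvPairsC, if_pos he, List.foldl]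
      rw [if_neg]
      rintro ⟨h1, h2⟩
      nlinarith
    · simp only [pvPairsC, if_neg he, List.foldl]
      rw [pvFold_desc end_led step hstep (g - 1) (c + step) _ j]
      by_cases hj : g.toNat = j
      · have hgj : g = (j : Int) := by omega
        rw [if_pos hj, if_neg (by omega), if_pos (by constructor <;> [omega; nlinarith])]
        congr 2 <;> rw [hgj] <;> ring
      · rw [if_neg hj]
        by_cases hc : (j : Int) ≤ g - 1 ∧ (c + step) + (g - 1 - j + 1) * step ≤ end_led
        · rw [if_pos hc, if_pos (by obtain ⟨hc1, hc2⟩ := hc; constructor <;> [omega; nlinarith])]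
          congr 2 <;> ring
        · rw [if_neg hc, if_neg]
          rintro ⟨h1, h2⟩
          exact hc ⟨by omega, by nlinarith⟩
  · rw [PySem.List.pyRange_neg_one_eq_nil (by omega : g ≤ -1)]
    simp only [pvPairsC, List.foldl]
    rw [if_neg (by rintro ⟨h1, _⟩; omega)]
termination_by (g + 1).toNat
decreasing_by omega

-- fold over the ascending run's pairs, closed form (step > 0, 0 ≤ a)
theorem pvFold_asc (end_led step : Int) (hstep : 0 < step) (n : Int) (a : Int) (ha : 0 ≤ a)
    (c : Int) (st : List (Int × Int)) (j : Nat) :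
    (pvPairsC end_led step (PySem.List.pyRange a n 1) c).1.foldl
        (fun st gr => if gr.1.toNat = j then PySem.Set.add st gr.2 else st) st
      = if a ≤ (j : Int) ∧ (j : Int) < n ∧ c + (j - a + 1) * step ≤ end_led then
          PySem.Set.add st (c + (j - a) * step, c + (j - a + 1) * step)
        else st := by
  by_cases hg : a < n
  · rw [PySem.List.pyRange_one_cons hg]
    by_cases he : c + step > end_led
    · simp only [pvPairsC, if_pos he, List.foldl]
      rw [if_neg]
      rintro ⟨h1, h2, h3⟩
      nlinarith
    · simp only [pvPairsC, if_neg he, List.foldl]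
      rw [pvFold_asc end_led step hstep n (a + 1) (by omega) (c + step) _ j]
      by_cases hj : a.toNat = j
      · have haj : a = (j : Int) := by omega
        rw [if_pos hj, if_neg (by omega), if_pos (by refine ⟨by omega, by omega, by nlinarith⟩)]
        congr 2 <;> rw [haj] <;> ring
      · rw [if_neg hj]
        by_cases hc : a + 1 ≤ (j : Int) ∧ (j : Int) < n ∧ (c + step) + (j - (a + 1) + 1) * step ≤ end_led
        · rw [if_pos hc, if_pos (by obtain ⟨hc1, hc2, hc3⟩ := hc; refine ⟨by omega, hc2, by nlinarith⟩)]
          congr 2 <;> ring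
        · rw [if_neg hc, if_neg]
          rintro ⟨h1, h2, h3⟩
          exact hc ⟨by omega, h2, by nlinarith⟩
  · rw [PySem.List.pyRange_one_eq_nil (by omega : n ≤ a)]
    simp only [pvPairsC, List.foldl]
    rw [if_neg (by rintro ⟨h1, h2, _⟩; omega)]
termination_by (n - a).toNat
decreasing_by omega

-- ===== VERDICT (by name: the statement is the Claim_ definition above) =====
theorem create_mirrored_groups_py_spec : Claim_equal_create_mirrored_groups_py := by
  intro start_led end_led number_of_groups _ hpre
  obtain ⟨hs0, he0, hn0, hse⟩ := hpre
  unfold Spec_create_mirrored_groups_py create_mirrored_groups_py create_mirrored_groups_py_alt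
  dsimp only
  have g1 : ¬ start_led < 0 := by omega
  have g2 : ¬ end_led < 0 := by omega
  have g3 : ¬ number_of_groups < 0 := by omega
  have g4 : ¬ end_led - start_led < 0 := by omega
  simp only [if_neg g1, if_neg g2, if_neg g3, if_neg g4]
  by_cases hz : end_led - start_led = 0 ∨ number_of_groups = 0
  · simp only [if_pos hz]
  · simp only [if_neg hz]
    have hn1 : 1 ≤ number_of_groups := by omega
    have hN1 : 1 ≤ end_led - start_led := by omega
    set n := number_of_groups with hn
    set NN := end_led - start_led with hNN
    set step := max 1 (PySem.Int.floordiv (max 1 (PySem.Int.floordiv NN n)) 2) with hstepdef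
    have hstep : 0 < step := by
      have := le_max_left (1:Int) (PySem.Int.floordiv (max 1 (PySem.Int.floordiv NN n)) 2)
      omega
    set R := PySem.Int.floordiv NN step with hR
    have hR0 : 0 ≤ R := by
      rw [hR, PySem.Int.floordiv_eq_ediv_of_pos hstep]
      exact Int.ediv_nonneg (by omega) (by omega)
    have hbracket : ∀ q : Int, q ≤ R ↔ q * step ≤ NN := by
      intro q; rw [hR, PySem.Int.le_floordiv_iff_mul_le hstep]
    set p := PySem.Int.mod R 2 with hp
    have hp01 : p = 0 ∨ p = 1 := by
      rw [hp, PySem.Int.mod_eq_emod_of_pos (by omega : (0:Int) < 2)]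
      omega
    have ha0 : (if p = 0 then (0:Int) else 1) = p := by rcases hp01 with h | h <;> simp [h]
    set t1 := min n R with ht1
    set t2 := max 0 (min (n - p) (R - t1)) with ht2
    rw [pvA_loop1_eq, pvA_loop2_eq, ha0]
    set P1 := pvPairsC end_led step (PySem.List.pyRange (n - 1) (-1) (-1)) start_led with hP1
    have hlen1 : ((P1.1).length : Int) = t1 := by
      rw [hP1, pvPairsC_length end_led step hstep]
      rw [PySem.List.length_pyRange_neg_one]
      rw [show end_led - start_led = NN from rfl, ← hR]
      have : ((n - 1 - (-1)).toNat : Int) = n := by omega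
      rw [this]
      omega
    have hc' : P1.2 = start_led + t1 * step := by
      rw [hP1, pvPairsC_snd, ← hP1, hlen1]
    apply List.ext_getElem
    · rw [pvScatter_length, pvScatter_length, List.length_replicate,
          List.length_map, PySem.List.length_pyRange_one]
      omega
    · intro j hj1 hj2
      have hjn : (j : Int) < n := by
        have := hj2
        rw [List.length_map, PySem.List.length_pyRange_one] at this
        omega
      -- B side entry
      rw [List.getElem_map, PySem.List.getElem_pyRange_one]
      -- A side entry
      refine Eq.trans (pvScatter_getElem _ _ j (by rw [pvScatter_length, List.length_replicate]; omega)) ?_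
      have hX := pvScatter_getElem P1.1 (List.replicate n.toNat ([] : List (Int × Int))) j
        (by rw [List.length_replicate]; omega)
      rw [hX, List.getElem_replicate, hc']
      rw [pvFold_desc end_led step hstep (n - 1) start_led ([] : List (Int × Int)) j]
      rw [pvFold_asc end_led step hstep n p (by omega) (start_led + t1 * step) _ j]
      -- closed forms on both sides; unfold B's group builder and match the ifs
      show _ = pvB_group start_led step t1 p t2 n (0 + (j : Int))
      simp only [pvB_group]
      have ht1facts : t1 = n ∨ t1 = R := min_choice n R
      have ht1a : t1 ≤ n := min_le_left n R
      have ht1b : t1 ≤ R := min_le_right n R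
      have hcond1 : ((j : Int) ≤ n - 1 ∧ start_led + (n - 1 - (j : Int) + 1) * step ≤ end_led)
          ↔ (n - t1 ≤ 0 + (j : Int)) := by
        have h1 : start_led + (n - 1 - (j : Int) + 1) * step ≤ end_led
            ↔ n - (j : Int) ≤ R := by
          rw [hbracket]
          constructor <;> intro h <;> [nlinarith; nlinarith]
        rw [h1]
        omega
      have ht2facts : t2 = 0 ∨ t2 = min (n - p) (R - t1) := max_choice 0 (min (n - p) (R - t1))
      have ht2a : min (n - p) (R - t1) ≤ n - p := min_le_left _ _
      have ht2b : min (n - p) (R - t1) ≤ R - t1 := min_le_right _ _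
      have ht2c : min (n - p) (R - t1) = n - p ∨ min (n - p) (R - t1) = R - t1 :=
        min_choice _ _
      have ht2d : 0 ≤ t2 := le_max_left _ _
      have hcond2 : (p ≤ (j : Int) ∧ (j : Int) < n ∧
            start_led + t1 * step + ((j : Int) - p + 1) * step ≤ end_led)
          ↔ (p ≤ 0 + (j : Int) ∧ 0 + (j : Int) < p + t2) := by
        have h1 : start_led + t1 * step + ((j : Int) - p + 1) * step ≤ end_led
            ↔ t1 + (j : Int) - p + 1 ≤ R := by
          rw [hbracket]
          constructor <;> intro h <;> nlinarith
        rw [h1]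
        omega
      have hval2 : (start_led + t1 * step + ((j : Int) - p) * step,
            start_led + t1 * step + ((j : Int) - p + 1) * step)
          = (start_led + (t1 + (0 + (j : Int)) - p) * step,
             start_led + (t1 + (0 + (j : Int)) - p + 1) * step) := by
        rw [Prod.mk.injEq]; constructor <;> ring
      rw [hval2]
      have hval1 : ((start_led + (n - 1 - (j : Int)) * step,
            start_led + (n - 1 - (j : Int) + 1) * step))
          = ((start_led + (n - 1 - (0 + (j : Int))) * step,
            start_led + (n - 1 - (0 + (j : Int)) + 1) * step)) := by
        rw [Prod.mk.injEq]; constructor <;> ring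
      rw [hval1]
      rw [if_congr hcond1 rfl rfl, if_congr hcond2 rfl rfl]
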